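-- pv_equiv track=rewrite | github.com/zelizhao/CorrectBench | Self-Correction-Benchmark/method_tool/critic/qa_evaluate.py | get_end_index
-- ===== SOURCE A (Python) =====
-- def get_end_index(tokens, end_tokens=["\n", "<|endoftext|>"], verbose=True):
--     stop_token = None
--     for end_tk in end_tokens:
--         for tk in tokens:
--             if end_tk in tk:
--                 stop_token = tk
--                 break
--     if not stop_token:
--         end_idx = len(tokens)
--     else:
--         end_idx = tokens.index(stop_token)
--     return end_idx
-- ===== SOURCE B (Python) =====
-- def get_end_index(tokens, end_tokens=["\n", "<|endoftext|>"], verbose=True):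
--     # Single pass over the tokens: record, for each end marker, the index of
--     # the first token containing it; then answer with the hit of the
--     # highest-priority (last-listed) marker, or len(tokens) if none occurred.
--     first_hit = [None] * len(end_tokens)
--     for i, tk in enumerate(tokens):
--         for j, e in enumerate(end_tokens):
--             if first_hit[j] is None and e in tk:
--                 first_hit[j] = i
--     for h in reversed(first_hit):
--         if h is not None:
--             return h
--     return len(tokens)
-- ===== Notes on version B (the rewrite author's own statement) =====
-- stated objective: alternative
-- what changed: B traverses the data token-major in a single pass, building a first-hit index table for all end markers at once and then picking the highest-priority hit, instead of A's marker-major repeated scans over tokens followed by a tokens.index re-scan; B also drops A's falsy-string sentinel check.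
-- intended difference: On inputs whose first token is the empty string and where '' is the effective (last-matching) end marker, A's 'if not stop_token' falsy check misreads the matched empty-string token as 'no match' and returns len(tokens); B returns 0, the index of the matching token, which is the intended first-match index. — e.g. on get_end_index([""], [""], true): A returns 1, B returns 0
import Mathlib
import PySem

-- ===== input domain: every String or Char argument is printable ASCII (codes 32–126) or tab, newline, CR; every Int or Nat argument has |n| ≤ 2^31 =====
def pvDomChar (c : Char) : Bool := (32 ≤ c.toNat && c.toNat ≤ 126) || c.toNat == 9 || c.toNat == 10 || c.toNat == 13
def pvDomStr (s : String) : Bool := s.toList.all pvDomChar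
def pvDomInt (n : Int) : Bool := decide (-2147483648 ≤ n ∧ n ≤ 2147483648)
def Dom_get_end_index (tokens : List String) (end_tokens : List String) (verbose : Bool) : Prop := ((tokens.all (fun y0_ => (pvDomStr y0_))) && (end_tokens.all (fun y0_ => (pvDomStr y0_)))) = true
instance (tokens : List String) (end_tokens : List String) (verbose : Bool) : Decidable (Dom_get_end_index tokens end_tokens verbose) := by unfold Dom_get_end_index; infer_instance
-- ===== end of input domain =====

-- B builds a first-hit table in one token-major pass and picks the highest-priority hit
-- (alternative traversal; no .index re-scan); B drops A's falsy-string sentinel check, see D_.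

-- ===== PORT A =====
def get_end_index (tokens : List String) (end_tokens : List String) (verbose : Bool) : Int :=
  let stop_token : Option String :=
    end_tokens.foldl (fun acc end_tk =>
      match tokens.find? (fun tk => PySem.Str.isIn end_tk tk) with
      | some tk => some tk
      | none => acc) none
  match stop_token with
  | none => (tokens.length : Int)
  | some t => if t = "" then (tokens.length : Int)    -- 'if not stop_token'
              else (((PySem.List.index? tokens t).getD 0 : Nat) : Int)  -- tokens.index(t); t ∈ tokens, getD unreachable

-- ===== PORT B =====
-- 'for h in reversed(first_hit): if h is not None: return h' / 'return len(tokens)'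
def pvPick (n : Int) : List (Option Int) → Int
  | [] => n
  | some h :: _ => h
  | none :: rest => pvPick n rest

def get_end_index_alt (tokens : List String) (end_tokens : List String) (verbose : Bool) : Int :=
  let first_hit : List (Option Int) :=
    (PySem.List.enumerate tokens 0).foldl (fun hits p =>
      -- inner loop over enumerate(end_tokens): 'if first_hit[j] is None and e in tk: first_hit[j] = i'
      List.zipWith (fun h e => if h = none ∧ PySem.Str.isIn e p.2 then some p.1 else h) hits end_tokens)
    (List.replicate end_tokens.length none)
  pvPick (tokens.length : Int) first_hit.reverse

-- ===== PRECONDITION & SPEC =====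
-- On inputs whose first token is "" and where "" is the effective (last-matching) end marker,
-- A's 'if not stop_token' falsy check misreads the matched empty-string token as no match and
-- returns len(tokens); B returns 0, the index of the matching token, the intended first-match index.
def D_get_end_index (tokens : List String) (end_tokens : List String) (verbose : Bool) : Prop :=
  tokens.head? = some "" ∧ "" ∈ end_tokens ∧
  ∀ e ∈ end_tokens.reverse.takeWhile (fun s => s != ""), ∀ tk ∈ tokens, PySem.Str.isIn e tk = false
instance (tokens : List String) (end_tokens : List String) (verbose : Bool) : Decidable (D_get_end_index tokens end_tokens verbose) := by unfold D_get_end_index; infer_instance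

def Spec_get_end_index (tokens : List String) (end_tokens : List String) (verbose : Bool) (out : Int) : Prop := ¬ D_get_end_index tokens end_tokens verbose → out = get_end_index_alt tokens end_tokens verbose
instance (tokens : List String) (end_tokens : List String) (verbose : Bool) (out : Int) : Decidable (Spec_get_end_index tokens end_tokens verbose out) := by unfold Spec_get_end_index; infer_instance

def pvDiffWitness_get_end_index : List String × List String × Bool := ([""], [""], true)
def pvDiffWitnessOut_get_end_index : Int × Int := (1, 0)

-- ===== CLAIM (what is proved, stated in full; the proofs are below) =====
def Claim_unchanged_get_end_index : Prop := ∀ (tokens : List String) (end_tokens : List String) (verbose : Bool), Dom_get_end_index tokens end_tokens verbose → Spec_get_end_index tokens end_tokens verbose (get_end_index tokens end_tokens verbose)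
def Claim_changed_get_end_index : Prop := Dom_get_end_index (pvDiffWitness_get_end_index.1) (pvDiffWitness_get_end_index.2.1) (pvDiffWitness_get_end_index.2.2) ∧ D_get_end_index (pvDiffWitness_get_end_index.1) (pvDiffWitness_get_end_index.2.1) (pvDiffWitness_get_end_index.2.2) ∧ get_end_index (pvDiffWitness_get_end_index.1) (pvDiffWitness_get_end_index.2.1) (pvDiffWitness_get_end_index.2.2) = pvDiffWitnessOut_get_end_index.1 ∧ get_end_index_alt (pvDiffWitness_get_end_index.1) (pvDiffWitness_get_end_index.2.1) (pvDiffWitness_get_end_index.2.2) = pvDiffWitnessOut_get_end_index.2 ∧ pvDiffWitnessOut_get_end_index.1 ≠ pvDiffWitnessOut_get_end_index.2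
def Claim_exact_get_end_index : Prop := ∀ (tokens : List String) (end_tokens : List String) (verbose : Bool), Dom_get_end_index tokens end_tokens verbose → D_get_end_index tokens end_tokens verbose → get_end_index tokens end_tokens verbose ≠ get_end_index_alt tokens end_tokens verbose

-- ===== LEMMAS AND PROOFS =====

-- A's loop step and final branch, named for the proofs
def pvStep (tokens : List String) (acc : Option String) (end_tk : String) : Option String :=
  match tokens.find? (fun tk => PySem.Str.isIn end_tk tk) with
  | some tk => some tk
  | none => acc

def pvFin (tokens : List String) : Option String → Int
  | none => (tokens.length : Int)
  | some t => if t = "" then (tokens.length : Int)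
              else (((PySem.List.index? tokens t).getD 0 : Nat) : Int)

-- the last overwriting match of A's fold, as a scan over the reversed marker list
def pvStopScan (tokens : List String) : List String → Option String
  | [] => none
  | e :: rest =>
    match tokens.find? (fun tk => PySem.Str.isIn e tk) with
    | some t => some t
    | none => pvStopScan tokens rest

-- B's winner: index of the first token containing the effective marker, same scan order
def pvWin (tokens : List String) : List String → Option Nat
  | [] => none
  | e :: rest =>
    match tokens.findIdx? (fun tk => PySem.Str.isIn e tk) with
    | some i => some i
    | none => pvWin tokens rest

theorem pv_fold_eq_stopScan (tokens : List String) :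
    ∀ (m : List String) (init : Option String),
      m.reverse.foldl (pvStep tokens) init =
      (match pvStopScan tokens m with | some t => some t | none => init) := by
  intro m
  induction m with
  | nil => intro init; rfl
  | cons e rest ih =>
    intro init
    rw [List.reverse_cons, List.foldl_append]
    simp only [List.foldl_cons, List.foldl_nil]
    rcases hf : tokens.find? (fun tk => PySem.Str.isIn e tk) with _ | t
    · rw [show pvStep tokens (rest.reverse.foldl (pvStep tokens) init) e
            = rest.reverse.foldl (pvStep tokens) init from by unfold pvStep; rw [hf]]
      rw [ih init]
      rw [show pvStopScan tokens (e :: rest) = pvStopScan tokens rest from by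
            rw [pvStopScan, hf]]
    · rw [show pvStep tokens (rest.reverse.foldl (pvStep tokens) init) e = some t from by
            unfold pvStep; rw [hf]]
      rw [show pvStopScan tokens (e :: rest) = some t from by rw [pvStopScan, hf]]

theorem pv_findIdx?_facts {α : Type} (p : α → Bool) :
    ∀ (l : List α) (i : Nat), l.findIdx? p = some i →
      ∃ h : i < l.length, p l[i] = true ∧ l.find? p = some l[i] ∧ ∀ j (hj : j < i), p (l[j]'(by omega)) = false := by
  intro l
  induction l with
  | nil => intro i h; simp at h
  | cons x xs ih =>
    intro i h
    by_cases hp : p x = true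
    · simp [List.findIdx?_cons, hp] at h
      subst h
      exact ⟨by simp, by simpa using hp, by simp [List.find?_cons, hp], by omega⟩
    · simp only [List.findIdx?_cons, hp] at h
      rw [Bool.not_eq_true] at hp
      simp [hp] at h
      obtain ⟨i', hi', rfl⟩ := h
      obtain ⟨h1, h2, h3, h4⟩ := ih i' hi'
      refine ⟨by simp; omega, by simpa using h2, by simpa [List.find?_cons, hp] using h3, ?_⟩
      intro j hj
      cases j with
      | zero => simpa using hp
      | succ j' => simpa using h4 j' (by omega)

theorem pv_index?_of_findIdx? {α : Type} [BEq α] [LawfulBEq α] (p : α → Bool)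
    (l : List α) (i : Nat) (h : l.findIdx? p = some i) (hlt : i < l.length) :
    PySem.List.index? l l[i] = some i := by
  obtain ⟨hlt', hp, _, hbefore⟩ := pv_findIdx?_facts p l i h
  rw [PySem.List.index?_eq_some_iff]
  refine ⟨l.take i, l.drop (i+1), ?_, by simp [List.length_take]; omega, ?_⟩
  · conv_lhs => rw [← List.take_append_drop i l]
    congr 1
    rw [List.drop_eq_getElem_cons hlt]
  · intro hmem
    obtain ⟨j, hj, hje⟩ := List.getElem_of_mem hmem
    rw [List.length_take] at hj
    have hj' : j < i := by omega
    have := hbefore j hj'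
    rw [List.getElem_take] at hje
    rw [hje] at this
    rw [hp] at this
    exact absurd this (by simp)

theorem pv_find?_none_iff_findIdx?_none {α : Type} (p : α → Bool) (l : List α) :
    l.find? p = none ↔ l.findIdx? p = none := by
  rw [List.find?_eq_none, List.findIdx?_eq_none_iff]
  constructor
  · intro h x hx; exact Bool.not_eq_true _ ▸ (by simpa using h x hx)
  · intro h x hx; simpa using h x hx

-- the two scans agree: either both report no match, or they report the same position/value
theorem pv_win_stop_rel (tokens : List String) :
    ∀ (r : List String),
      (pvWin tokens r = none ∧ pvStopScan tokens r = none) ∨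
      (∃ i, ∃ _ : i < tokens.length, pvWin tokens r = some i ∧
        pvStopScan tokens r = some tokens[i] ∧ PySem.List.index? tokens tokens[i] = some i) := by
  intro r
  induction r with
  | nil => left; exact ⟨rfl, rfl⟩
  | cons e rest ih =>
    unfold pvWin pvStopScan
    rcases hidx : tokens.findIdx? (fun tk => PySem.Str.isIn e tk) with _ | i
    · have hf : tokens.find? (fun tk => PySem.Str.isIn e tk) = none :=
        (pv_find?_none_iff_findIdx?_none _ _).mpr hidx
      rw [hf]; exact ih
    · obtain ⟨hlt, _, hfind, _⟩ := pv_findIdx?_facts _ tokens i hidx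
      rw [hfind]
      right
      exact ⟨i, hlt, rfl, rfl, pv_index?_of_findIdx? _ tokens i hidx hlt⟩

-- '' is contained in every string
theorem pv_isIn_empty_left (s : String) : PySem.Str.isIn "" s = true := by
  rw [PySem.Str.isIn_iff_infix]; exact List.nil_infix

-- only '' is contained in ''
theorem pv_isIn_empty_right {e : String} (h : PySem.Str.isIn e "" = true) : e = "" := by
  rw [PySem.Str.isIn_iff_infix] at h
  have : e.toList = [] := List.eq_nil_of_infix_nil (by simpa using h)
  exact String.toList_eq_nil_iff.mp this

-- the D_ facts (phrased over r = end_tokens.reverse) force stop = some "" and winner index 0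
theorem pv_D_scan (ts : List String) :
    ∀ (r : List String), "" ∈ r →
      (∀ e ∈ r.takeWhile (fun s => s != ""), ∀ tk ∈ ("" :: ts), PySem.Str.isIn e tk = false) →
      pvStopScan ("" :: ts) r = some "" ∧ pvWin ("" :: ts) r = some 0 := by
  intro r
  induction r with
  | nil => intro h; simp at h
  | cons e rest ih =>
    intro hmem hpre
    by_cases he : e = ""
    · subst he
      unfold pvStopScan pvWin
      rw [List.find?_cons_of_pos (pv_isIn_empty_left ""), List.findIdx?_cons,
          if_pos (pv_isIn_empty_left "")]
      exact ⟨rfl, rfl⟩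
    · have htw : (e :: rest).takeWhile (fun s => s != "") = e :: rest.takeWhile (fun s => s != "") := by
        simp [he]
      have hfe : ∀ tk ∈ ("" :: ts), PySem.Str.isIn e tk = false := by
        intro tk htk
        exact hpre e (by rw [htw]; exact List.mem_cons_self ..) tk htk
      have hfnone : ("" :: ts).find? (fun tk => PySem.Str.isIn e tk) = none := by
        rw [List.find?_eq_none]; intro x hx; simpa using hfe x hx
      have hinone := (pv_find?_none_iff_findIdx?_none _ _).mp hfnone
      unfold pvStopScan pvWin
      rw [hfnone, hinone]
      exact ih (by rcases List.mem_cons.mp hmem with h | h; exact absurd h.symm he; exact h)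
        (by intro e' he' tk htk; exact hpre e' (by rw [htw]; exact List.mem_cons_of_mem _ he') tk htk)

-- conversely, stop = some "" forces the D_ facts
theorem pv_scan_D (tokens : List String) :
    ∀ (r : List String), pvStopScan tokens r = some "" →
      tokens.head? = some "" ∧ "" ∈ r ∧
      (∀ e ∈ r.takeWhile (fun s => s != ""), ∀ tk ∈ tokens, PySem.Str.isIn e tk = false) := by
  intro r
  induction r with
  | nil => intro h; simp [pvStopScan] at h
  | cons e rest ih =>
    intro h
    unfold pvStopScan at h
    rcases hf : tokens.find? (fun tk => PySem.Str.isIn e tk) with _ | t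
    · rw [hf] at h
      obtain ⟨h0, hmem, hpre⟩ := ih h
      have he : e ≠ "" := by
        intro he; subst he
        rw [List.find?_eq_none] at hf
        cases tokens with
        | nil => simp at h0
        | cons t ts =>
          have := hf t (List.mem_cons_self ..)
          simp [pv_isIn_empty_left] at this
      refine ⟨h0, List.mem_cons_of_mem _ hmem, ?_⟩
      intro e' he' tk htk
      rw [List.takeWhile_cons, if_pos (by simpa using he)] at he'
      rcases List.mem_cons.mp he' with h' | h'
      · subst h'
        rw [List.find?_eq_none] at hf
        have := hf tk htk
        simpa using this
      · exact hpre e' h' tk htk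
    · rw [hf] at h
      have ht : t = "" := by injection h
      subst ht
      have he : e = "" := pv_isIn_empty_right (by
        have := List.find?_some hf; simpa using this)
      subst he
      have h0 : tokens.head? = some "" := by
        cases tokens with
        | nil => simp at hf
        | cons t ts =>
          rw [List.find?_cons_of_pos (pv_isIn_empty_left t)] at hf
          injection hf with hf'; rw [hf']
          rfl
      exact ⟨h0, List.mem_cons_self .., by simp [pv_isIn_empty_left]⟩

-- B's token-major fold computes, per marker, the first containing token's index
theorem pv_hits_fold (end_tokens : List String) :
    ∀ (tokens : List String) (k : Int) (acc : String → Option Int),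
      (PySem.List.enumerate tokens k).foldl (fun hits p =>
          List.zipWith (fun h e => if h = none ∧ PySem.Str.isIn e p.2 then some p.1 else h) hits end_tokens)
        (end_tokens.map acc) =
      end_tokens.map (fun e =>
        match acc e with
        | some v => some v
        | none => (tokens.findIdx? (fun tk => PySem.Str.isIn e tk)).map (fun n => k + n)) := by
  intro tokens
  induction tokens with
  | nil =>
    intro k acc
    simp only [PySem.List.enumerate_nil, List.foldl_nil]
    apply List.map_congr_left
    intro e _
    rcases acc e with _ | v <;> simp
  | cons tk rest ih =>
    intro k acc
    rw [PySem.List.enumerate_cons, List.foldl_cons]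
    have hzip : List.zipWith (fun h e => if h = none ∧ PySem.Str.isIn e tk then some k else h)
        (end_tokens.map acc) end_tokens =
        end_tokens.map (fun e => if acc e = none ∧ PySem.Str.isIn e tk then some k else acc e) := by
      rw [List.zipWith_map_left, List.zipWith_self]
    rw [hzip, ih (k + 1) _]
    apply List.map_congr_left
    intro e _
    rcases hae : acc e with _ | v
    · rcases hin : PySem.Str.isIn e tk with _ | _
      · rw [if_neg (by simp [hin])]
        simp only [List.findIdx?_cons, hin, Bool.false_eq_true, if_false]
        rcases List.findIdx? (fun tk => PySem.Str.isIn e tk) rest with _ | n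
        · rfl
        · simp
          omega
      · rw [if_pos (by simp [hin])]
        simp only [List.findIdx?_cons, hin, if_true]
        simp
    · simp

-- picking backwards through the hit table is the winner scan
theorem pv_pick_eq_win (tokens : List String) (n : Int) :
    ∀ (r : List String),
      pvPick n (r.map (fun e => (tokens.findIdx? (fun tk => PySem.Str.isIn e tk)).map (fun m => (0 : Int) + m))) =
      (match pvWin tokens r with | some i => (i : Int) | none => n) := by
  intro r
  induction r with
  | nil => rfl
  | cons e rest ih =>
    simp only [List.map_cons]
    unfold pvWin
    rcases hidx : tokens.findIdx? (fun tk => PySem.Str.isIn e tk) with _ | i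
    · simpa [pvPick] using ih
    · simp [pvPick]

-- characterizations of the two ports
theorem pv_A_char (tokens end_tokens : List String) (verbose : Bool) :
    get_end_index tokens end_tokens verbose = pvFin tokens (pvStopScan tokens end_tokens.reverse) := by
  show pvFin tokens (end_tokens.foldl (pvStep tokens) none) = _
  have h := pv_fold_eq_stopScan tokens end_tokens.reverse none
  rw [List.reverse_reverse] at h
  rw [h]
  rcases pvStopScan tokens end_tokens.reverse with _ | t <;> rfl

theorem pv_B_char (tokens end_tokens : List String) (verbose : Bool) :
    get_end_index_alt tokens end_tokens verbose =
      (match pvWin tokens end_tokens.reverse with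
       | some i => (i : Int) | none => (tokens.length : Int)) := by
  show pvPick (tokens.length : Int)
      ((((PySem.List.enumerate tokens 0)).foldl _ (List.replicate end_tokens.length none)).reverse) = _
  rw [show (List.replicate end_tokens.length (none : Option Int)) = end_tokens.map (fun _ => none) by
        simp]
  rw [pv_hits_fold end_tokens tokens 0 (fun _ => none)]
  simp only []
  rw [← List.map_reverse]
  exact pv_pick_eq_win tokens _ end_tokens.reverse

-- ===== VERDICT (by name: the statements are the Claim_ definitions above) =====
theorem get_end_index_spec : Claim_unchanged_get_end_index := by
  intro tokens end_tokens verbose _ hnd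
  show get_end_index tokens end_tokens verbose = get_end_index_alt tokens end_tokens verbose
  rw [pv_A_char, pv_B_char]
  rcases pv_win_stop_rel tokens end_tokens.reverse with ⟨hw, hs⟩ | ⟨i, hlt, hw, hs, hix⟩
  · rw [hw, hs]; rfl
  · rw [hw, hs]
    by_cases hz : tokens[i] = ""
    · exfalso
      apply hnd
      obtain ⟨h0, hmem, hpre⟩ := pv_scan_D tokens end_tokens.reverse (hz ▸ hs)
      exact ⟨h0, List.mem_reverse.mp hmem, hpre⟩
    · rw [PySem.List.index?_eq_idxOf?] at hix
      simp [pvFin, hz, hix]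

theorem get_end_index_changed : Claim_changed_get_end_index := by
  unfold Claim_changed_get_end_index; decide

theorem get_end_index_tight : Claim_exact_get_end_index := by
  intro tokens end_tokens verbose _ hd
  obtain ⟨h0, hmem, hpre⟩ := hd
  obtain ⟨ts, rfl⟩ : ∃ ts, tokens = "" :: ts := by
    cases tokens with
    | nil => simp at h0
    | cons t ts => exact ⟨ts, by simp at h0; rw [h0]⟩
  obtain ⟨hs, hw⟩ := pv_D_scan ts end_tokens.reverse (List.mem_reverse.mpr hmem) hpre
  rw [pv_A_char, pv_B_char, hs, hw]
  simp [pvFin]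
  omega
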